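-- pv_equiv track=rewrite | github.com/valhalla/valhalla | locales/build.py | make_example_phrases
-- ===== SOURCE A (Python) =====
-- from itertools import product
--
-- def make_example_phrases(raw_phrase, tokens, examples_tokens):
--     examples = []
--     if len(tokens) == 0:
--         examples.append(raw_phrase)
--     else:
--         inp = {}
--         for token in tokens:
--             inp[token] = examples_tokens[token]
--         permutations = (dict(zip(inp.keys(), values)) for values in product(*inp.values()))
--         for perm in permutations:
--             phrase = raw_phrase
--             for token, replacement in perm.items():
--                 phrase = phrase.replace('<{}>'.format(token), str(replacement))
--             examples.append(phrase)
--     return examples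
-- ===== SOURCE B (Python) =====
-- def make_example_phrases(raw_phrase, tokens, examples_tokens):
--     inp = {}
--     for token in tokens:
--         inp[token] = examples_tokens[token]
--     phrases = [raw_phrase]
--     for token, choices in inp.items():
--         replacement_list = list(choices)
--         phrases = [p.replace('<{}>'.format(token), str(v))
--                    for p in phrases for v in replacement_list]
--     return phrases
-- ===== Notes on version B (the rewrite author's own statement) =====
-- stated objective: simpler
-- what changed: B drops itertools.product and the per-tuple dict(zip(...)) reconstruction: it expands the phrase list token by token ([p.replace(...) for p in phrases for v in choices]), which yields the same phrases in the same order.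
import Mathlib
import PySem

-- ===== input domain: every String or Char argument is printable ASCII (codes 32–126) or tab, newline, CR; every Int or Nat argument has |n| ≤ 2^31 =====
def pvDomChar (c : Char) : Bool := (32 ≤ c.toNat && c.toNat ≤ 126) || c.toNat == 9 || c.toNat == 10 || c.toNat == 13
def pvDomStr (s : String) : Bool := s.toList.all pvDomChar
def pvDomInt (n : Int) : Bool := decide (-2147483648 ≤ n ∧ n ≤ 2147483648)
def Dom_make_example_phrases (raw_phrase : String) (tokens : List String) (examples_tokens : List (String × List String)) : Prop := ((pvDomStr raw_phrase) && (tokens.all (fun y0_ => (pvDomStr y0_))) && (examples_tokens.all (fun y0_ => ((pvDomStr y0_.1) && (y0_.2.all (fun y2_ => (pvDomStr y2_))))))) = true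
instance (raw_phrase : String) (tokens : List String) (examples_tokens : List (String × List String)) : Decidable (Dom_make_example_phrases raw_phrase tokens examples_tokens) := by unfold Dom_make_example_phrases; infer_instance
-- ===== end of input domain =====

-- B builds the Cartesian product by successive list expansion over the deduplicated tokens
-- instead of itertools.product over tuples (objective: simpler decomposition, same cost).


-- ===== PORT A =====
-- itertools.product(*lists), each combination as a list (leftmost varies slowest)
def pvProduct (ls : List (List String)) : List (List String) :=
  match ls with
  | [] => [[]]
  | l :: rest => l.flatMap (fun x => (pvProduct rest).map (fun c => x :: c))

-- the inner loop: phrase = phrase.replace('<{}>'.format(token), str(replacement))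
def pvApplyPerm (raw : String) (perm : List (String × String)) : String :=
  perm.foldl (fun ph tv => PySem.Str.replace ph ("<" ++ tv.1 ++ ">") tv.2) raw

def make_example_phrases (raw_phrase : String) (tokens : List String) (examples_tokens : List (String × List String)) : List String :=
  if tokens.length == 0 then
    [raw_phrase]
  else
    let d := PySem.Dict.ofList examples_tokens
    -- inp[token] = examples_tokens[token]  (getD with []: Pre_ guarantees the key exists, where Python would raise KeyError)
    let inp := tokens.foldl (fun acc t => acc.insert t (PySem.Dict.getD d t [])) (PySem.Dict.empty)
    (pvProduct inp.values).foldl (fun examples c => examples ++ [pvApplyPerm raw_phrase (inp.keys.zip c)]) []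

-- ===== PORT B =====
def make_example_phrases_alt (raw_phrase : String) (tokens : List String) (examples_tokens : List (String × List String)) : List String :=
  let d := PySem.Dict.ofList examples_tokens
  let inp := tokens.foldl (fun acc t => acc.insert t (PySem.Dict.getD d t [])) (PySem.Dict.empty)
  inp.items.foldl
    (fun phrases tv =>
      phrases.flatMap (fun p => tv.2.map (fun v => PySem.Str.replace p ("<" ++ tv.1 ++ ">") v)))
    [raw_phrase]

-- ===== PRECONDITION & SPEC =====
-- Pre_ excludes inputs where some token is not a key of examples_tokens: Python A (and B) raise KeyError there.
def Pre_make_example_phrases (raw_phrase : String) (tokens : List String) (examples_tokens : List (String × List String)) : Prop :=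
  ∀ t ∈ tokens, t ∈ examples_tokens.map Prod.fst
instance (raw_phrase : String) (tokens : List String) (examples_tokens : List (String × List String)) : Decidable (Pre_make_example_phrases raw_phrase tokens examples_tokens) := by unfold Pre_make_example_phrases; infer_instance
def pvWitness_make_example_phrases : String × List String × (List (String × List String)) :=
  ("go to <place> now", ["place", "place"], [("place", ["home", "work"])])

def Spec_make_example_phrases (raw_phrase : String) (tokens : List String) (examples_tokens : List (String × List String)) (out : List String) : Prop := out = make_example_phrases_alt raw_phrase tokens examples_tokens
instance (raw_phrase : String) (tokens : List String) (examples_tokens : List (String × List String)) (out : List String) : Decidable (Spec_make_example_phrases raw_phrase tokens examples_tokens out) := by unfold Spec_make_example_phrases; infer_instance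

-- ===== CLAIM (what is proved, stated in full; the proofs are below) =====
def Claim_equal_make_example_phrases : Prop := ∀ (raw_phrase : String) (tokens : List String) (examples_tokens : List (String × List String)), Dom_make_example_phrases raw_phrase tokens examples_tokens → Pre_make_example_phrases raw_phrase tokens examples_tokens → Spec_make_example_phrases raw_phrase tokens examples_tokens (make_example_phrases raw_phrase tokens examples_tokens)

-- ===== LEMMAS AND PROOFS =====

-- successive expansion (B's fold over the dict items) equals mapping pvApplyPerm over the product (A)
lemma pv_expand (items : List (String × List String)) (ps : List String) :
    ps.flatMap (fun p => (pvProduct (items.map Prod.snd)).map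
        (fun c => pvApplyPerm p ((items.map Prod.fst).zip c)))
    = items.foldl
        (fun phrases tv =>
          phrases.flatMap (fun p => tv.2.map (fun v => PySem.Str.replace p ("<" ++ tv.1 ++ ">") v)))
        ps := by
  induction items generalizing ps with
  | nil => simp [pvProduct, pvApplyPerm]
  | cons tv rest ih =>
    rw [List.foldl_cons, ← ih]
    simp only [pvProduct, List.map_cons, List.flatMap_assoc, List.map_flatMap,
      List.flatMap_map, List.map_map]
    congr 1

theorem make_example_phrases_spec : Claim_equal_make_example_phrases := by
  intro raw tokens et _ _
  show make_example_phrases raw tokens et = make_example_phrases_alt raw tokens et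
  unfold make_example_phrases make_example_phrases_alt
  by_cases h : tokens = []
  · subst h; simp [PySem.Dict.empty]
  · simp only [List.length_eq_zero_iff, beq_iff_eq, h]
    set inp := tokens.foldl (fun acc t => acc.insert t (PySem.Dict.getD (PySem.Dict.ofList et) t [])) (PySem.Dict.empty) with hinp
    have hk : inp.keys = inp.items.map Prod.fst := rfl
    have hv : inp.values = inp.items.map Prod.snd := rfl
    rw [PySem.List.foldl_append_singleton_eq_map, hk, hv, ← pv_expand inp.items [raw]]
    simp
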